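-- pv_equiv track=rewrite | github.com/wangxinyu0922/Second_Order_SDP | tookits/check_file.py | find_second_step
-- ===== SOURCE A (Python) =====
-- def find_second_step(lists):
-- 	i = len(lists)-1
-- 	pos1 = 0
-- 	pos2 = 0
-- 	find = 0
-- 	while i>=0:
-- 		if "Epoch" in lists[i] and find == 1:
-- 			pos2 = i
-- 			find = 2
-- 			return pos1,pos2
-- 		if "Epoch" in lists[i] and find == 0:
-- 			pos1 = i
-- 			find = 1
-- 		i-=1
-- 	return [-1,-1]
-- ===== SOURCE B (Python) =====
-- def find_second_step(lists):
--     idx = [i for i, line in enumerate(lists) if "Epoch" in line]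
--     if len(idx) >= 2:
--         return idx[-1], idx[-2]
--     return [-1, -1]
-- ===== Notes on version B (the rewrite author's own statement) =====
-- stated objective: simpler
-- what changed: Replaces the backward while-loop state machine (index counter, pos1/pos2, find flag, early return) by a single forward comprehension collecting all matching indices, then slicing the last two.
import Mathlib
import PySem

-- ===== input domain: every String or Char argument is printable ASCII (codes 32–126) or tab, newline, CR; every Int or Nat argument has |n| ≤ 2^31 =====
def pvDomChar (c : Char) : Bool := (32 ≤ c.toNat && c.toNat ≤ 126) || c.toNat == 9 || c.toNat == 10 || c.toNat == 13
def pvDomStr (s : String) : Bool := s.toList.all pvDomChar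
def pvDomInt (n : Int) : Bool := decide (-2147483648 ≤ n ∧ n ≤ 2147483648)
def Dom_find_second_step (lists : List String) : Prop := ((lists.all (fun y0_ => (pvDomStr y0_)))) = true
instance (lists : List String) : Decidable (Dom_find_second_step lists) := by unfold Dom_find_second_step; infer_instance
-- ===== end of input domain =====

-- B replaces A's backward while-loop state machine by a forward collect-all-matching-indices
-- pass followed by taking the last two; objective: simpler.


-- ===== PORT A =====
-- A's while loop runs i from len-1 down to 0; fuel = i+1, so the index examined is fuel-1.
-- State `find = 1` (pos1 already found) is the separate recursion fssGo1; `find = 0` is fssGo0.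
-- lists[i] is always in range inside the loop, so List.getD is exact here.
def fssGo1 (lists : List String) (pos1 : Int) : Nat → List Int
  | 0 => [-1, -1]
  | n + 1 =>
      if PySem.Str.isIn "Epoch" (lists.getD n "") then [pos1, (n : Int)]
      else fssGo1 lists pos1 n

def fssGo0 (lists : List String) : Nat → List Int
  | 0 => [-1, -1]
  | n + 1 =>
      if PySem.Str.isIn "Epoch" (lists.getD n "") then fssGo1 lists (n : Int) n
      else fssGo0 lists n

def find_second_step (lists : List String) : List Int :=
  fssGo0 lists lists.length

-- ===== PORT B =====
-- idx = [i for i, line in enumerate(lists) if "Epoch" in line]; the negative indexing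
-- idx[-1]/idx[-2] is guarded by len(idx) >= 2, so the .getD 0 default is never used.
def find_second_step_alt (lists : List String) : List Int :=
  let idx : List Int :=
    ((PySem.List.enumerate lists 0).filter (fun p => PySem.Str.isIn "Epoch" p.2)).map (·.1)
  if 2 ≤ idx.length then
    [(PySem.List.pyGet? idx (-1)).getD 0, (PySem.List.pyGet? idx (-2)).getD 0]
  else [-1, -1]

-- ===== PRECONDITION & SPEC =====
def Spec_find_second_step (lists : List String) (out : List Int) : Prop := out = find_second_step_alt lists
instance (lists : List String) (out : List Int) : Decidable (Spec_find_second_step lists out) := by unfold Spec_find_second_step; infer_instance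

-- ===== CLAIM (what is proved, stated in full; the proofs are below) =====
def Claim_equal_find_second_step : Prop := ∀ (lists : List String), Dom_find_second_step lists → Spec_find_second_step lists (find_second_step lists)

-- ===== LEMMAS AND PROOFS =====

-- the matching entries among the first n lines, in forward order
def fssT (lists : List String) (n : Nat) : List Int :=
  (((PySem.List.enumerate lists 0).take n).filter
    (fun p => PySem.Str.isIn "Epoch" p.2)).map (·.1)

theorem fssT_succ (lists : List String) (n : Nat) (h : n < lists.length) :
    fssT lists (n + 1) =
      fssT lists n ++ (if PySem.Str.isIn "Epoch" (lists.getD n "") then [(n : Int)] else []) := by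
  unfold fssT
  rw [List.take_add_one, PySem.List.getElem?_enumerate]
  rw [List.getElem?_eq_getElem h]
  simp [List.filter_append, List.getD, List.getElem?_eq_getElem h]
  split_ifs with hE <;> simp_all [List.filter]

theorem fssGo1_eq (lists : List String) (p : Int) (n : Nat) (h : n ≤ lists.length) :
    fssGo1 lists p n =
      match (fssT lists n).reverse with
      | j :: _ => [p, j]
      | [] => [-1, -1] := by
  induction n with
  | zero => simp [fssGo1, fssT]
  | succ m ih =>
      rw [fssT_succ lists m (by omega)]
      simp only [fssGo1, List.reverse_append]
      split_ifs with hm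
      · simp
      · simp [ih (by omega)]

theorem fssGo0_eq (lists : List String) (n : Nat) (h : n ≤ lists.length) :
    fssGo0 lists n =
      match (fssT lists n).reverse with
      | a :: b :: _ => [a, b]
      | _ => [-1, -1] := by
  induction n with
  | zero => simp [fssGo0, fssT]
  | succ m ih =>
      rw [fssT_succ lists m (by omega)]
      simp only [fssGo0, List.reverse_append]
      split_ifs with hm
      · rw [fssGo1_eq lists (m : Int) m (by omega)]
        simp
        rcases (fssT lists m).reverse with _ | ⟨j, t⟩ <;> simp
      · simp [ih (by omega)]

theorem fssT_full (lists : List String) :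
    fssT lists lists.length =
      ((PySem.List.enumerate lists 0).filter (fun p => PySem.Str.isIn "Epoch" p.2)).map (·.1) := by
  unfold fssT
  rw [List.take_of_length_le (by simp [PySem.List.length_enumerate])]

-- ===== VERDICT (by name: the statement is the Claim_ definition above) =====
theorem find_second_step_spec : Claim_equal_find_second_step := by
  intro lists _
  unfold Spec_find_second_step find_second_step find_second_step_alt
  rw [fssGo0_eq lists lists.length le_rfl, fssT_full]
  set idx : List Int :=
    ((PySem.List.enumerate lists 0).filter (fun p => PySem.Str.isIn "Epoch" p.2)).map (·.1) with hidx
  rcases hrev : idx.reverse with _ | ⟨a, _ | ⟨b, t⟩⟩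
  · have : idx = [] := by simpa using congrArg List.reverse hrev
    simp [this]
  · have : idx = [a] := by simpa using congrArg List.reverse hrev
    simp [this]
  · have hidx' : idx = t.reverse ++ [b, a] := by
      have := congrArg List.reverse hrev
      simpa using this
    have hlen : idx.length = t.length + 2 := by simp [hidx']
    have h2 : 2 ≤ idx.length := by omega
    simp only [if_pos h2]
    rw [PySem.List.pyGet?_neg_one]
    rw [PySem.List.pyGet?_neg_ofNat idx 2 (by omega) (by omega)]
    simp [hidx', List.getLast?_append]
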